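-- pv_equiv track=rewrite | github.com/AbhishekKolakkal/sdeInterviewThings | intermidiateProblems2.py | distinctWindowNumbers
-- ===== SOURCE A (Python) =====
-- def distinctWindowNumbers(A, B):
--     '''
--     we need to return the count of distinct number in the window size of the array
--     the function will return an array
--     if B > N return empty array
--
--     [1, 2, 1, 3, 4, 3] and window size is 3
--     [1,2,1] = 2
--     [2,1,3] = 3
--     [1,3,4] = 3
--     [3,4,3] = 2
--
--     algo
--     1. first check if B > N then return []
--     2. initialize result with empty array
--     3. we will be doing a for loop starting with 0 to len(A) - 3
--         a. in this for loop we will be slicing the array in +2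
--         b. put the value in set and get the count and append in the result array
--         c. Once done move on
--     '''
--
--     result = []
--
--     if B > len(A):
--         return result
--
--     for i in range(0, len(A) - B + 1):
--         hashset = set()
--         count = i
--         while (count < i + B):
--             hashset.add(A[count])
--             count += 1
--         result.append(len(hashset))
--     return result
-- ===== SOURCE B (Python) =====
-- def distinctWindowNumbers(A, B):
--     # Sliding window with a frequency dict: one pass, add entering / remove leaving element.
--     # For non-positive window sizes there is no window, so return [].
--     n = len(A)
--     if B > n or B <= 0:
--         return []
--     freq = {}
--     distinct = 0
--     result = []
--     for i, x in enumerate(A):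
--         c = freq.get(x, 0)
--         if c == 0:
--             distinct += 1
--         freq[x] = c + 1
--         if i >= B:
--             y = A[i - B]
--             freq[y] -= 1
--             if freq[y] == 0:
--                 distinct -= 1
--         if i >= B - 1:
--             result.append(distinct)
--     return result
-- ===== Notes on version B (the rewrite author's own statement) =====
-- stated objective: faster
-- what changed: Replaced the per-window rebuild of a fresh set (inner while loop over each window) by a single sliding-window pass that maintains a frequency dict and a running distinct counter, adding the entering element and removing the leaving one.
-- intended difference: For non-positive window sizes B <= 0 (with B <= len(A)), A's range/while arithmetic makes it return a list of len(A)-B+1 zeros (counts of empty windows that do not exist), while B returns [], the intended answer since there are no windows of non-positive size. — e.g. on distinctWindowNumbers([], 0): A returns [0], B returns []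
import Mathlib
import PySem

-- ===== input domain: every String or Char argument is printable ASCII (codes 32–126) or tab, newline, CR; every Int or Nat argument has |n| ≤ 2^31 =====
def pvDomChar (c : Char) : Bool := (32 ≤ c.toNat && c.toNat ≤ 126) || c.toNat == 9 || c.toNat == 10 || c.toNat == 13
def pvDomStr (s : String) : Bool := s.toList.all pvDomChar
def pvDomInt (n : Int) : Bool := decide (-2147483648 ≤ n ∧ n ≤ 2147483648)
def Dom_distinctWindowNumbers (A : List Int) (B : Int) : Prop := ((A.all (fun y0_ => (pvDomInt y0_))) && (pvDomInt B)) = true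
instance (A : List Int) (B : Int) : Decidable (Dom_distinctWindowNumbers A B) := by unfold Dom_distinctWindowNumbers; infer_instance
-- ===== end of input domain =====

-- B replaces A's per-window set rebuild by a one-pass sliding window with a frequency
-- dict and a running distinct counter; for B <= 0, A returns a list of zeros (counts of
-- nonexistent empty windows) while B returns [] — stated as D_ below.

-- ===== PORT A =====
-- the inner 'while (count < i + B): hashset.add(A[count]); count += 1' loop of A
def pvAWhile (A : List Int) (stop : Int) (count : Int) (hs : PySem.Set Int) : PySem.Set Int :=
  if count < stop then
    pvAWhile A stop (count + 1) (PySem.Set.add hs (PySem.List.pyGetD A count 0))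
  else hs
termination_by (stop - count).toNat
decreasing_by omega

def distinctWindowNumbers (A : List Int) (B : Int) : List Int :=
  let result : List Int := []
  if B > (A.length : Int) then result
  else
    (PySem.List.pyRange 0 ((A.length : Int) - B + 1)).foldl
      (fun res i => res ++ [PySem.Set.len (pvAWhile A (i + B) i PySem.Set.empty)]) result

-- ===== PORT B =====
-- the body of B's single 'for i, x in enumerate(A)' loop
def pvBStep (A : List Int) (B : Int) (st : PySem.Dict Int Int × Int × List Int)
    (p : Int × Int) : PySem.Dict Int Int × Int × List Int :=
  let freq := st.1
  let distinct := st.2.1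
  let result := st.2.2
  let i := p.1
  let x := p.2
  let c := freq.getD x 0
  let distinct := if c = 0 then distinct + 1 else distinct
  let freq := freq.insert x (c + 1)
  let fd :=
    if i ≥ B then
      let y := PySem.List.pyGetD A (i - B) 0
      let freq := freq.insert y (freq.getD y 0 - 1)
      (freq, if freq.getD y 0 = 0 then distinct - 1 else distinct)
    else (freq, distinct)
  let result := if i ≥ B - 1 then result ++ [fd.2] else result
  (fd.1, fd.2, result)

def distinctWindowNumbers_alt (A : List Int) (B : Int) : List Int :=
  let n : Int := A.length
  if B > n ∨ B ≤ 0 then []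
  else
    ((PySem.List.enumerate A 0).foldl (pvBStep A B)
      ((PySem.Dict.empty : PySem.Dict Int Int), (0 : Int), ([] : List Int))).2.2

-- ===== PRECONDITION & SPEC =====
-- For non-positive window sizes B ≤ 0, A returns a list of len(A)-B+1 zeros (distinct counts
-- of empty "windows" produced by its range arithmetic) while B returns [], the intended
-- answer since no window of non-positive size exists.
def D_distinctWindowNumbers (A : List Int) (B : Int) : Prop := B ≤ 0
instance (A : List Int) (B : Int) : Decidable (D_distinctWindowNumbers A B) := by
  unfold D_distinctWindowNumbers; infer_instance

def Spec_distinctWindowNumbers (A : List Int) (B : Int) (out : List Int) : Prop :=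
  ¬ D_distinctWindowNumbers A B → out = distinctWindowNumbers_alt A B
instance (A : List Int) (B : Int) (out : List Int) : Decidable (Spec_distinctWindowNumbers A B out) := by
  unfold Spec_distinctWindowNumbers; infer_instance

def pvDiffWitness_distinctWindowNumbers : List Int × Int := ([], 0)
def pvDiffWitnessOut_distinctWindowNumbers : (List Int) × (List Int) := ([0], [])

-- ===== CLAIM (what is proved, stated in full; the proofs are below) =====
def Claim_unchanged_distinctWindowNumbers : Prop := ∀ (A : List Int) (B : Int),
  Dom_distinctWindowNumbers A B → Spec_distinctWindowNumbers A B (distinctWindowNumbers A B)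

def Claim_changed_distinctWindowNumbers : Prop :=
  Dom_distinctWindowNumbers (pvDiffWitness_distinctWindowNumbers.1) (pvDiffWitness_distinctWindowNumbers.2) ∧
  D_distinctWindowNumbers (pvDiffWitness_distinctWindowNumbers.1) (pvDiffWitness_distinctWindowNumbers.2) ∧
  distinctWindowNumbers (pvDiffWitness_distinctWindowNumbers.1) (pvDiffWitness_distinctWindowNumbers.2) = pvDiffWitnessOut_distinctWindowNumbers.1 ∧
  distinctWindowNumbers_alt (pvDiffWitness_distinctWindowNumbers.1) (pvDiffWitness_distinctWindowNumbers.2) = pvDiffWitnessOut_distinctWindowNumbers.2 ∧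
  pvDiffWitnessOut_distinctWindowNumbers.1 ≠ pvDiffWitnessOut_distinctWindowNumbers.2

def Claim_exact_distinctWindowNumbers : Prop := ∀ (A : List Int) (B : Int),
  Dom_distinctWindowNumbers A B → D_distinctWindowNumbers A B →
  distinctWindowNumbers A B ≠ distinctWindowNumbers_alt A B

-- ===== LEMMAS AND PROOFS =====

-- the window of size b ending after the first k elements (for k < b: the whole prefix)
def pvWin (A : List Int) (b k : Nat) : List Int := (A.take k).drop (k - b)

-- the common specification both ports are reduced to
def pvOut (A : List Int) (b : Nat) : List Int :=
  (List.range (A.length + 1 - b)).map (fun j => (((A.drop j).take b).toFinset.card : Int))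

theorem pvCard_append_singleton (w : List Int) (x : Int) :
    ((w ++ [x]).toFinset.card : Int)
      = (w.toFinset.card : Int) + (if w.count x = 0 then 1 else 0) := by
  by_cases hx : x ∈ w
  · simp [List.toFinset_append, Finset.insert_eq_self.mpr (List.mem_toFinset.mpr hx),
      List.count_eq_zero, hx]
  · simp [List.toFinset_append, Finset.card_insert_of_notMem (fun h => hx (List.mem_toFinset.mp h)),
      List.count_eq_zero, hx]

theorem pvCard_cons (y : Int) (l : List Int) :
    ((y :: l).toFinset.card : Int)
      = (l.toFinset.card : Int) + (if l.count y = 0 then 1 else 0) := by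
  by_cases hy : y ∈ l
  · simp [Finset.insert_eq_self.mpr (List.mem_toFinset.mpr hy), List.count_eq_zero, hy]
  · simp [Finset.card_insert_of_notMem (fun h => hy (List.mem_toFinset.mp h)),
      List.count_eq_zero, hy]

theorem pvCount_append_singleton (w : List Int) (x z : Int) :
    ((w ++ [x]).count z : Int) = (w.count z : Int) + (if z = x then 1 else 0) := by
  rcases eq_or_ne z x with h | h
  · simp [List.count_append, List.count_singleton, h]
  · simp [List.count_append, List.count_singleton, h, Ne.symm h]

-- ----- A side -----

theorem pvAWhile_spec (A : List Int) (c : Nat) : ∀ (j : Int) (s : PySem.Set Int),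
    pvAWhile A (j + c) j s
      = PySem.Set.update s ((List.range c).map (fun (t : Nat) => PySem.List.pyGetD A (j + (t : Int)) 0)) := by
  induction c with
  | zero => intro j s; rw [pvAWhile]; simp
  | succ c ih =>
    intro j s
    rw [pvAWhile, if_pos (by push_cast; omega)]
    have h1 : j + ((c + 1 : Nat) : Int) = (j + 1) + (c : Nat) := by push_cast; ring
    rw [h1, ih]
    rw [List.range_succ_eq_map, List.map_cons, List.map_map, PySem.Set.update_cons]
    congr 1
    · norm_num
    · apply List.map_congr_left
      intro t _
      simp only [Function.comp_apply]
      congr 1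
      push_cast; ring

theorem pvWin_map (A : List Int) (b j : Nat) (h : j + b ≤ A.length) :
    (List.range b).map (fun (t : Nat) => PySem.List.pyGetD A ((j : Int) + (t : Int)) 0)
      = (A.drop j).take b := by
  apply List.ext_getElem
  · simp; omega
  · intro i h1 h2
    simp only [List.getElem_map, List.getElem_range, List.getElem_take, List.getElem_drop]
    have hc : (j : Int) + (i : Int) = ((j + i : Nat) : Int) := by push_cast; ring
    rw [hc, PySem.List.pyGetD_natCast]
    exact List.getD_eq_getElem A 0 (by simp at h1 ⊢; omega)

theorem pvSet_len_ofList (l : List Int) :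
    PySem.Set.len (PySem.Set.ofList l) = (l.toFinset.card : Int) := by
  have h1 : (PySem.Set.ofList l).toFinset = l.toFinset := by
    ext x; simp [List.mem_toFinset, PySem.Set.mem_ofList]
  have h2 : (PySem.Set.ofList l).toFinset.card = (PySem.Set.ofList l).length :=
    List.toFinset_card_of_nodup (PySem.Set.nodup_ofList l)
  simp only [PySem.Set.len]
  rw [← h1, h2]

theorem pvA_side (A : List Int) (B : Int) (hB : 1 ≤ B) (hn : B ≤ (A.length : Int)) :
    distinctWindowNumbers A B = pvOut A B.toNat := by
  rw [distinctWindowNumbers]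
  rw [if_neg (by omega)]
  rw [PySem.List.foldl_append_singleton_eq_map]
  have hm : (A.length : Int) - B + 1 = ((A.length + 1 - B.toNat : Nat) : Int) := by omega
  rw [hm, PySem.List.pyRange_zero_natCast, List.map_map, pvOut]
  simp only [List.nil_append]
  apply List.map_congr_left
  intro j hj
  simp only [List.mem_range] at hj
  simp only [Function.comp_apply]
  have h1 : (j : Int) + B = (j : Int) + ((B.toNat : Nat) : Int) := by omega
  rw [h1, pvAWhile_spec A B.toNat (j : Int) PySem.Set.empty]
  rw [pvWin_map A B.toNat j (by omega)]
  rw [PySem.Set.update_empty]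
  exact pvSet_len_ofList _

-- ----- B side -----

theorem pvWin_succ_small (A : List Int) (b k : Nat) (hk : k < A.length) (hkb : k < b) :
    pvWin A b (k + 1) = pvWin A b k ++ [A[k]] := by
  simp only [pvWin, Nat.sub_eq_zero_of_le hkb, Nat.sub_eq_zero_of_le (Nat.le_of_lt hkb),
    List.drop_zero]
  rw [List.take_succ, List.getElem?_eq_getElem hk]
  rfl

theorem pvWin_succ_big (A : List Int) (b k : Nat) (hk : k < A.length) (hkb : b ≤ k) :
    pvWin A b k ++ [A[k]] = A[k - b]'(by omega) :: pvWin A b (k + 1) := by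
  have h2 : A.take (k + 1) = A.take k ++ [A[k]] := by
    rw [List.take_succ, List.getElem?_eq_getElem hk]; rfl
  simp only [pvWin]
  rw [← List.drop_append_of_le_length (by simp [List.length_take]; omega), ← h2]
  rw [List.drop_eq_getElem_cons (by simp [List.length_take]; omega)]
  congr 1
  · simp [List.getElem_take]
  · congr 1
    omega

theorem pvWin_eq_dropTake (A : List Int) (b k : Nat) (hbk : b ≤ k) (hk : k ≤ A.length) :
    pvWin A b k = (A.drop (k - b)).take b := by
  simp only [pvWin]
  rw [List.drop_take]
  congr 1
  omega

theorem pvBStep_inv (A : List Int) (B : Int) (hB : 1 ≤ B) (hn : B ≤ (A.length : Int))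
    (k : Nat) (hk : k < A.length)
    (freq : PySem.Dict Int Int) (distinct : Int) (result : List Int)
    (hfreq : ∀ x, freq.getD x 0 = ((pvWin A B.toNat k).count x : Int))
    (hdist : distinct = ((pvWin A B.toNat k).toFinset.card : Int)) :
    (∀ x, (pvBStep A B (freq, distinct, result) ((k : Int), A[k])).1.getD x 0
        = ((pvWin A B.toNat (k + 1)).count x : Int)) ∧
    (pvBStep A B (freq, distinct, result) ((k : Int), A[k])).2.1
        = ((pvWin A B.toNat (k + 1)).toFinset.card : Int) ∧
    (pvBStep A B (freq, distinct, result) ((k : Int), A[k])).2.2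
        = (if B.toNat ≤ k + 1 then
             result ++ [((pvWin A B.toNat (k + 1)).toFinset.card : Int)]
           else result) := by
  have hBb : B = (B.toNat : Int) := by omega
  have hc0 : freq.getD A[k] 0 = 0 ↔ (pvWin A B.toNat k).count A[k] = 0 := by
    rw [hfreq]; exact Int.natCast_eq_zero
  have hd1 : (if freq.getD A[k] 0 = 0 then distinct + 1 else distinct)
      = (((pvWin A B.toNat k ++ [A[k]]).toFinset.card : Nat) : Int) := by
    rw [pvCard_append_singleton, ← hdist]
    by_cases h : (pvWin A B.toNat k).count A[k] = 0
    · rw [if_pos (hc0.mpr h), if_pos h]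
    · rw [if_neg (fun hh => h (hc0.mp hh)), if_neg h, add_zero]
  have hf1 : ∀ z, (freq.insert A[k] (freq.getD A[k] 0 + 1)).getD z 0
      = (((pvWin A B.toNat k ++ [A[k]]).count z : Nat) : Int) := by
    intro z
    rw [PySem.Dict.getD_insert, pvCount_append_singleton]
    by_cases h : z = A[k]
    · rw [if_pos h, if_pos h, hfreq, h]
    · rw [if_neg h, if_neg h, hfreq, add_zero]
  by_cases hcase : B.toNat ≤ k
  · -- removal branch: the window slides
    have hcond : ((k : Int) ≥ B) := by omega
    have hcond2 : ((k : Int) ≥ B - 1) := by omega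
    have hkb : k - B.toNat < A.length := by omega
    have key : pvWin A B.toNat k ++ [A[k]]
        = A[k - B.toNat]'hkb :: pvWin A B.toNat (k + 1) := pvWin_succ_big A B.toNat k hk hcase
    have hy : PySem.List.pyGetD A ((k : Int) - B) 0 = A[k - B.toNat]'hkb := by
      have h1 : (k : Int) - B = ((k - B.toNat : Nat) : Int) := by omega
      rw [h1, PySem.List.pyGetD_natCast]
      exact List.getD_eq_getElem A 0 hkb
    have hstep : pvBStep A B (freq, distinct, result) ((k : Int), A[k])
        = (((freq.insert A[k] (freq.getD A[k] 0 + 1)).insert (PySem.List.pyGetD A ((k : Int) - B) 0)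
              ((freq.insert A[k] (freq.getD A[k] 0 + 1)).getD (PySem.List.pyGetD A ((k : Int) - B) 0) 0 - 1)),
           (if ((freq.insert A[k] (freq.getD A[k] 0 + 1)).insert (PySem.List.pyGetD A ((k : Int) - B) 0)
                  ((freq.insert A[k] (freq.getD A[k] 0 + 1)).getD (PySem.List.pyGetD A ((k : Int) - B) 0) 0 - 1)).getD
                (PySem.List.pyGetD A ((k : Int) - B) 0) 0 = 0
            then (if freq.getD A[k] 0 = 0 then distinct + 1 else distinct) - 1
            else (if freq.getD A[k] 0 = 0 then distinct + 1 else distinct)),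
           result ++ [(if ((freq.insert A[k] (freq.getD A[k] 0 + 1)).insert (PySem.List.pyGetD A ((k : Int) - B) 0)
                  ((freq.insert A[k] (freq.getD A[k] 0 + 1)).getD (PySem.List.pyGetD A ((k : Int) - B) 0) 0 - 1)).getD
                (PySem.List.pyGetD A ((k : Int) - B) 0) 0 = 0
            then (if freq.getD A[k] 0 = 0 then distinct + 1 else distinct) - 1
            else (if freq.getD A[k] 0 = 0 then distinct + 1 else distinct))]) := by
      simp only [pvBStep, if_pos hcond, if_pos hcond2]
    rw [hy] at hstep
    have hcnt : ∀ w, ((pvWin A B.toNat k ++ [A[k]]).count w : Int)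
        = ((pvWin A B.toNat (k + 1)).count w : Int)
          + (if w = A[k - B.toNat]'hkb then 1 else 0) := by
      intro w
      rw [key]
      by_cases h : w = A[k - B.toNat]'hkb
      · simp [List.count_cons, h]
      · simp [List.count_cons, h, Ne.symm h]
    have hf2 : ∀ z,
        ((freq.insert A[k] (freq.getD A[k] 0 + 1)).insert (A[k - B.toNat]'hkb)
          ((freq.insert A[k] (freq.getD A[k] 0 + 1)).getD (A[k - B.toNat]'hkb) 0 - 1)).getD z 0
        = ((pvWin A B.toNat (k + 1)).count z : Int) := by
      intro z
      rw [PySem.Dict.getD_insert]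
      by_cases h : z = A[k - B.toNat]'hkb
      · rw [if_pos h, hf1, hcnt, if_pos rfl, h]
        push_cast
        ring
      · rw [if_neg h, hf1, hcnt, if_neg h, add_zero]
    have hdd : (if ((freq.insert A[k] (freq.getD A[k] 0 + 1)).insert (A[k - B.toNat]'hkb)
          ((freq.insert A[k] (freq.getD A[k] 0 + 1)).getD (A[k - B.toNat]'hkb) 0 - 1)).getD
            (A[k - B.toNat]'hkb) 0 = 0 then
          (if freq.getD A[k] 0 = 0 then distinct + 1 else distinct) - 1
        else (if freq.getD A[k] 0 = 0 then distinct + 1 else distinct))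
        = ((pvWin A B.toNat (k + 1)).toFinset.card : Int) := by
      rw [hf2, hd1, key, pvCard_cons]
      by_cases h : (pvWin A B.toNat (k + 1)).count (A[k - B.toNat]'hkb) = 0
      · rw [if_pos (by exact_mod_cast congrArg (Nat.cast : Nat → Int) h), if_pos h]
        push_cast; ring
      · rw [if_neg (by exact_mod_cast fun hh => h (Int.natCast_eq_zero.mp hh)), if_neg h]
        push_cast; ring
    rw [hstep]
    refine ⟨fun z => hf2 z, hdd, ?_⟩
    rw [if_pos (show B.toNat ≤ k + 1 by omega)]
    exact congrArg (fun t => result ++ [t]) hdd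
  · -- no removal: the window grows
    have hkb : k < B.toNat := by omega
    have hwin : pvWin A B.toNat (k + 1) = pvWin A B.toNat k ++ [A[k]] :=
      pvWin_succ_small A B.toNat k hk hkb
    have hcond : ¬ ((k : Int) ≥ B) := by omega
    by_cases h2 : (k : Int) ≥ B - 1
    · have hstep : pvBStep A B (freq, distinct, result) ((k : Int), A[k])
          = ((freq.insert A[k] (freq.getD A[k] 0 + 1)),
             (if freq.getD A[k] 0 = 0 then distinct + 1 else distinct),
             result ++ [(if freq.getD A[k] 0 = 0 then distinct + 1 else distinct)]) := by
        simp only [pvBStep, if_neg hcond, if_pos h2]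
      rw [hstep]
      refine ⟨?_, ?_, ?_⟩
      · intro z; rw [hwin]; exact hf1 z
      · rw [hwin]; exact hd1
      · rw [if_pos (show B.toNat ≤ k + 1 by omega), hwin]
        exact congrArg (fun t => result ++ [t]) hd1
    · have hstep : pvBStep A B (freq, distinct, result) ((k : Int), A[k])
          = ((freq.insert A[k] (freq.getD A[k] 0 + 1)),
             (if freq.getD A[k] 0 = 0 then distinct + 1 else distinct),
             result) := by
        simp only [pvBStep, if_neg hcond, if_neg h2]
      rw [hstep]
      refine ⟨?_, ?_, ?_⟩
      · intro z; rw [hwin]; exact hf1 z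
      · rw [hwin]; exact hd1
      · rw [if_neg (show ¬ B.toNat ≤ k + 1 by omega)]

theorem pvB_fold (A : List Int) (B : Int) (hB : 1 ≤ B) (hn : B ≤ (A.length : Int)) :
    ∀ (m k : Nat), A.length - k = m → k ≤ A.length →
    ∀ (freq : PySem.Dict Int Int) (distinct : Int) (result : List Int),
    (∀ x, freq.getD x 0 = ((pvWin A B.toNat k).count x : Int)) →
    distinct = (((pvWin A B.toNat k).toFinset.card : Nat) : Int) →
    result = (List.range (k + 1 - B.toNat)).map
        (fun j => (((A.drop j).take B.toNat).toFinset.card : Int)) →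
    ((PySem.List.enumerate (A.drop k) k).foldl (pvBStep A B) (freq, distinct, result)).2.2
      = pvOut A B.toNat := by
  intro m
  induction m with
  | zero =>
    intro k hm hk freq distinct result hfreq hdist hres
    have hkn : k = A.length := by omega
    subst hkn
    rw [List.drop_length]
    simp only [PySem.List.enumerate_nil, List.foldl_nil]
    rw [hres, pvOut]
  | succ m ih =>
    intro k hm hk freq distinct result hfreq hdist hres
    have hkn : k < A.length := by omega
    rw [List.drop_eq_getElem_cons hkn, PySem.List.enumerate_cons, List.foldl_cons]
    obtain ⟨hf', hd', hr'⟩ := pvBStep_inv A B hB hn k hkn freq distinct result hfreq hdist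
    have hcast : ((k : Int) + 1) = ((k + 1 : Nat) : Int) := by push_cast; ring
    rw [hcast]
    have hsplit : pvBStep A B (freq, distinct, result) ((k : Int), A[k])
        = ((pvBStep A B (freq, distinct, result) ((k : Int), A[k])).1,
           (pvBStep A B (freq, distinct, result) ((k : Int), A[k])).2.1,
           (pvBStep A B (freq, distinct, result) ((k : Int), A[k])).2.2) := rfl
    rw [hsplit]
    refine ih (k + 1) (by omega) (by omega) _ _ _ hf' hd' ?_
    rw [hr', hres]
    by_cases hc : B.toNat ≤ k + 1
    · rw [if_pos hc]
      have h1 : (k + 1) + 1 - B.toNat = ((k + 1) - B.toNat) + 1 := by omega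
      rw [h1, List.range_succ, List.map_append, List.map_cons, List.map_nil]
      rw [show pvWin A B.toNat (k + 1) = (A.drop ((k + 1) - B.toNat)).take B.toNat from
        pvWin_eq_dropTake A B.toNat (k + 1) hc (by omega)]
    · rw [if_neg hc]
      have h1 : (k + 1) + 1 - B.toNat = k + 1 - B.toNat := by omega
      rw [h1]

theorem pvB_side (A : List Int) (B : Int) (hB : 1 ≤ B) (hn : B ≤ (A.length : Int)) :
    distinctWindowNumbers_alt A B = pvOut A B.toNat := by
  rw [distinctWindowNumbers_alt]
  rw [if_neg (by push_neg; omega)]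
  have h0 : PySem.List.enumerate A 0 = PySem.List.enumerate (A.drop 0) ((0 : Nat) : Int) := by
    simp
  rw [h0]
  refine pvB_fold A B hB hn A.length 0 (by omega) (by omega) PySem.Dict.empty 0 [] ?_ ?_ ?_
  · intro x
    simp [pvWin, PySem.Dict.getD_empty]
  · simp [pvWin]
  · have h1 : 0 + 1 - B.toNat = 0 := by omega
    rw [h1]
    simp

-- ===== VERDICT (by name: the statement is the Claim_ definition above) =====
theorem distinctWindowNumbers_spec : Claim_unchanged_distinctWindowNumbers := by
  intro A B _ 
  unfold Spec_distinctWindowNumbers D_distinctWindowNumbers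
  intro hD
  push_neg at hD
  by_cases hbig : B > (A.length : Int)
  · rw [distinctWindowNumbers, distinctWindowNumbers_alt]
    simp [hbig]
  · push_neg at hbig
    rw [pvA_side A B (by omega) hbig, pvB_side A B (by omega) hbig]

theorem distinctWindowNumbers_changed : Claim_changed_distinctWindowNumbers := by
  unfold Claim_changed_distinctWindowNumbers
  refine ⟨by decide, by decide, ?_, by decide, by decide⟩
  show distinctWindowNumbers [] 0 = [0]
  rw [distinctWindowNumbers]
  norm_num
  rw [show PySem.List.pyRange 0 1 = [0] from by decide]
  simp only [List.map, List.flatten]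
  rw [pvAWhile, if_neg (by norm_num)]
  decide

theorem distinctWindowNumbers_tight : Claim_exact_distinctWindowNumbers := by
  intro A B _ hD
  unfold D_distinctWindowNumbers at hD
  have halt : distinctWindowNumbers_alt A B = [] := by
    rw [distinctWindowNumbers_alt]; simp [hD]
  rw [halt, distinctWindowNumbers]
  have hcond : ¬ (B > (A.length : Int)) := by omega
  rw [if_neg hcond]
  rw [PySem.List.foldl_append_singleton_eq_map]
  rw [PySem.List.pyRange_one_cons (by omega : (0:Int) < (A.length : Int) - B + 1)]
  simp
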